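-- pv_equiv track=rewrite | github.com/GundalaNikhil/DSA | dsa-problems/Hashing/testcases/tc_generator/generate_gmt014_tests_v2.py | solve_game
-- ===== SOURCE A (Python) =====
-- def solve_game(n, A):
--     prefix_sum = [0] * (n + 1)
--     for i in range(n):
--         prefix_sum[i+1] = prefix_sum[i] + A[i]
--
--     def get_sum(i, j):
--         return prefix_sum[j+1] - prefix_sum[i]
--
--     memo = {}
--     def solve(i, j):
--         if i == j: return 0
--         state = (i, j)
--         if state in memo: return memo[state]
--
--         res = -float('inf')
--         for k in range(i, j):
--             sum_left = get_sum(i, k)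
--             sum_right = get_sum(k + 1, j)
--
--             val_take_left = -sum_left - solve(k + 1, j)
--             val_take_right = -sum_right - solve(i, k)
--
--             res = max(res, min(val_take_left, val_take_right))
--
--         memo[state] = res
--         return res
--
--     return solve(0, n - 1)
-- ===== SOURCE B (Python) =====
-- def solve_game(n, A):
--     prefix_sum = [0] * (n + 1)
--     for i in range(n):
--         prefix_sum[i+1] = prefix_sum[i] + A[i]
--
--     def get_sum(i, j):
--         return prefix_sum[j+1] - prefix_sum[i]
--
--     dp = [[0] * n for _ in range(n)]
--     for length in range(2, n + 1):
--         for i in range(n - length + 1):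
--             j = i + length - 1
--             res = None
--             for k in range(i, j):
--                 v = min(-get_sum(i, k) - dp[k+1][j], -get_sum(k+1, j) - dp[i][k])
--                 if res is None or v > res:
--                     res = v
--             dp[i][j] = res
--     return dp[0][n-1]
-- ===== Notes on version B (the rewrite author's own statement) =====
-- stated objective: alternative
-- what changed: Replaced the memoized top-down recursion (dict memo, recursive solve) by an iterative bottom-up DP table filled by increasing interval length; the prefix-sum array is kept.
-- outside the precondition, e.g. on solve_game(0, []): A returns -inf, B raises IndexError; on solve_game(-1, [5]): A returns -inf, B raises IndexError
import Mathlib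
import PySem

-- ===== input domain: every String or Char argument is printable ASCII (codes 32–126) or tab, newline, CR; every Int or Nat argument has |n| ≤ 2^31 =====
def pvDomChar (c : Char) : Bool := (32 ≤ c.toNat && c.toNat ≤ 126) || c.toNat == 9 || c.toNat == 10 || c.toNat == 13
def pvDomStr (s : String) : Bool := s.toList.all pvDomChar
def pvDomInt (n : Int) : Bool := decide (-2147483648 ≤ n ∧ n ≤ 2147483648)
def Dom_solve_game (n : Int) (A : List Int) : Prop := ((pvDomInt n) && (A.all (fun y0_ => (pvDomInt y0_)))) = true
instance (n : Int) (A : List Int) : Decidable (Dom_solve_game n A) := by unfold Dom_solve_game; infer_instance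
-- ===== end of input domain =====

-- B replaces A's memoized top-down recursion by an iterative bottom-up DP table filled
-- by increasing interval length (same prefix-sum array); an alternative of the same cost.

-- ===== PORT A =====
-- shared with B (Source B keeps A's prefix_sum/get_sum verbatim): prefix_sum construction and get_sum
def pvPrefix (n : Int) (A : List Int) : List Int :=
  (List.range n.toNat).foldl
    (fun ps i => ps.set (i + 1) (ps.getD i 0 + A.getD i 0))
    (List.replicate (n.toNat + 1) 0)

def pvGetSum (ps : List Int) (i j : Nat) : Int := ps.getD (j + 1) 0 - ps.getD i 0

-- A's `solve(i, j)` with the memo dict threaded through; `res` starts as Python's -inf,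
-- modelled as `none` (for i < j the loop is non-empty, so `max(-inf, v) = v` is the first value).
def aSolve (ps : List Int) (i j : Nat) (memo : PySem.Dict (Nat × Nat) Int) :
    Int × PySem.Dict (Nat × Nat) Int :=
  if i = j then (0, memo)
  else
    match PySem.Dict.get? memo (i, j) with
    | some v => (v, memo)
    | none =>
      let st := (List.range' i (j - i)).attach.foldl
        (fun (acc : Option Int × PySem.Dict (Nat × Nat) Int) kk =>
          let p1 := aSolve ps (kk.1 + 1) j acc.2
          let p2 := aSolve ps i kk.1 p1.2
          let v := min (-(pvGetSum ps i kk.1) - p1.1) (-(pvGetSum ps (kk.1 + 1) j) - p2.1)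
          ((match acc.1 with | none => some v | some res => some (max res v)), p2.2))
        ((none : Option Int), memo)
      (st.1.getD 0, PySem.Dict.insert st.2 (i, j) (st.1.getD 0))
termination_by (j - i)
decreasing_by
  · have := kk.2; simp [List.mem_range'_1] at this; omega
  · have := kk.2; simp [List.mem_range'_1] at this; omega

def solve_game (n : Int) (A : List Int) : Int :=
  (aSolve (pvPrefix n A) 0 (n - 1).toNat PySem.Dict.empty).1

-- ===== PORT B =====
def pvGet2 (dp : List (List Int)) (i j : Nat) : Int := (dp.getD i []).getD j 0

def pvSet2 (dp : List (List Int)) (i j : Nat) (v : Int) : List (List Int) :=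
  dp.set i ((dp.getD i []).set j v)

-- the inner `for k in range(i, j)` loop of Source B; `res = None` is `none`
-- (for i < j the loop is non-empty, so the stored value is never None)
def pvCell (ps : List Int) (dp : List (List Int)) (i j : Nat) : Int :=
  ((List.range' i (j - i)).foldl
    (fun (res : Option Int) k =>
      let v := min (-(pvGetSum ps i k) - pvGet2 dp (k + 1) j)
                   (-(pvGetSum ps (k + 1) j) - pvGet2 dp i k)
      match res with
      | none => some v
      | some r => if v > r then some v else some r)
    none).getD 0

def solve_game_alt (n : Int) (A : List Int) : Int :=
  let N := n.toNat
  let ps := pvPrefix n A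
  let dpF := (List.range' 2 (N + 1 - 2)).foldl
    (fun dp len =>
      (List.range (N - len + 1)).foldl
        (fun dp i => pvSet2 dp i (i + len - 1) (pvCell ps dp i (i + len - 1)))
        dp)
    (List.replicate N (List.replicate N (0 : Int)))
  pvGet2 dpF 0 (N - 1)

-- ===== PRECONDITION & SPEC =====
-- Pre_ excludes n ≤ 0 (A returns float('-inf'), not an int) and n > len(A) (A raises IndexError).
def Pre_solve_game (n : Int) (A : List Int) : Prop := 1 ≤ n ∧ n ≤ A.length
instance (n : Int) (A : List Int) : Decidable (Pre_solve_game n A) := by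
  unfold Pre_solve_game; infer_instance

def pvWitness_solve_game : Int × List Int := (2, [1, 2])

def Spec_solve_game (n : Int) (A : List Int) (out : Int) : Prop := out = solve_game_alt n A
instance (n : Int) (A : List Int) (out : Int) : Decidable (Spec_solve_game n A out) := by
  unfold Spec_solve_game; infer_instance

-- ===== CLAIM (what is proved, stated in full; the proofs are below) =====
def Claim_equal_solve_game : Prop :=
  ∀ (n : Int) (A : List Int), Dom_solve_game n A → Pre_solve_game n A →
    Spec_solve_game n A (solve_game n A)

-- ===== LEMMAS AND PROOFS =====

-- the game value, as a plain (memo-free) recursion; both ports are proved equal to it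
def pureV (ps : List Int) (i j : Nat) : Int :=
  if i = j then 0
  else
    ((List.range' i (j - i)).attach.foldl
      (fun (acc : Option Int) kk =>
        let v := min (-(pvGetSum ps i kk.1) - pureV ps (kk.1 + 1) j)
                     (-(pvGetSum ps (kk.1 + 1) j) - pureV ps i kk.1)
        (match acc with | none => some v | some res => some (max res v)))
      none).getD 0
termination_by (j - i)
decreasing_by
  · have := kk.2; simp [List.mem_range'_1] at this; omega
  · have := kk.2; simp [List.mem_range'_1] at this; omega

def MemoOK (ps : List Int) (m : PySem.Dict (Nat × Nat) Int) : Prop :=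
  ∀ p v, m.get? p = some v → v = pureV ps p.1 p.2

theorem memoOK_insert (ps : List Int) (m : PySem.Dict (Nat × Nat) Int) (i j : Nat)
    (hm : MemoOK ps m) (hv : pureV ps i j = w) :
    MemoOK ps (PySem.Dict.insert m (i, j) w) := by
  intro p v hget
  rw [PySem.Dict.get?_insert] at hget
  split at hget
  · rename_i hp; cases hget; subst hp; exact hv.symm
  · exact hm p v hget

theorem aSolve_eq_pureV (ps : List Int) :
    ∀ (d i j : Nat) (memo : PySem.Dict (Nat × Nat) Int), j - i < d → MemoOK ps memo →
      (aSolve ps i j memo).1 = pureV ps i j ∧ MemoOK ps (aSolve ps i j memo).2 := by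
  intro d
  induction d with
  | zero => intro i j memo hd; omega
  | succ d ih =>
    intro i j memo hd hm
    by_cases h : i = j
    · subst h
      constructor
      · rw [aSolve, pureV]
        simp
      · rw [aSolve]
        simpa using hm
    · have key : ∀ (l : List {x // x ∈ List.range' i (j - i)})
          (acc : Option Int × PySem.Dict (Nat × Nat) Int), MemoOK ps acc.2 →
          (l.foldl
            (fun (acc : Option Int × PySem.Dict (Nat × Nat) Int) kk =>
              ((match acc.1 with
                | none => some (min (-pvGetSum ps i kk.1 - (aSolve ps (kk.1 + 1) j acc.2).1)
                    (-pvGetSum ps (kk.1 + 1) j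
                      - (aSolve ps i kk.1 (aSolve ps (kk.1 + 1) j acc.2).2).1))
                | some res => some (max res
                    (min (-pvGetSum ps i kk.1 - (aSolve ps (kk.1 + 1) j acc.2).1)
                      (-pvGetSum ps (kk.1 + 1) j
                        - (aSolve ps i kk.1 (aSolve ps (kk.1 + 1) j acc.2).2).1)))),
               (aSolve ps i kk.1 (aSolve ps (kk.1 + 1) j acc.2).2).2)) acc).1
            = l.foldl
                (fun (acc : Option Int) kk =>
                  (match acc with
                  | none => some (min (-pvGetSum ps i kk.1 - pureV ps (kk.1 + 1) j)
                      (-pvGetSum ps (kk.1 + 1) j - pureV ps i kk.1))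
                  | some res => some (max res
                      (min (-pvGetSum ps i kk.1 - pureV ps (kk.1 + 1) j)
                        (-pvGetSum ps (kk.1 + 1) j - pureV ps i kk.1))))) acc.1 ∧
          MemoOK ps (l.foldl
            (fun (acc : Option Int × PySem.Dict (Nat × Nat) Int) kk =>
              ((match acc.1 with
                | none => some (min (-pvGetSum ps i kk.1 - (aSolve ps (kk.1 + 1) j acc.2).1)
                    (-pvGetSum ps (kk.1 + 1) j
                      - (aSolve ps i kk.1 (aSolve ps (kk.1 + 1) j acc.2).2).1))
                | some res => some (max res
                    (min (-pvGetSum ps i kk.1 - (aSolve ps (kk.1 + 1) j acc.2).1)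
                      (-pvGetSum ps (kk.1 + 1) j
                        - (aSolve ps i kk.1 (aSolve ps (kk.1 + 1) j acc.2).2).1)))),
               (aSolve ps i kk.1 (aSolve ps (kk.1 + 1) j acc.2).2).2)) acc).2 := by
        intro l
        induction l with
        | nil => intro acc hacc; exact ⟨rfl, hacc⟩
        | cons kk rest ihl =>
          rintro ⟨aopt, amem⟩ hacc
          have hk := kk.2
          rw [List.mem_range'_1] at hk
          obtain ⟨hk1, hk2⟩ := hk
          have c1 := ih (kk.1 + 1) j amem (by omega) hacc
          have c2 := ih i kk.1 (aSolve ps (kk.1 + 1) j amem).2 (by omega) c1.2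
          cases aopt with
          | none =>
            simp only [List.foldl_cons]
            rw [c1.1, c2.1]
            obtain ⟨f1, f2⟩ := ihl
              (some (min (-pvGetSum ps i kk.1 - pureV ps (kk.1 + 1) j)
                  (-pvGetSum ps (kk.1 + 1) j - pureV ps i kk.1)),
               (aSolve ps i kk.1 (aSolve ps (kk.1 + 1) j amem).2).2) c2.2
            exact ⟨f1, f2⟩
          | some res =>
            simp only [List.foldl_cons]
            rw [c1.1, c2.1]
            obtain ⟨f1, f2⟩ := ihl
              (some (max res (min (-pvGetSum ps i kk.1 - pureV ps (kk.1 + 1) j)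
                  (-pvGetSum ps (kk.1 + 1) j - pureV ps i kk.1))),
               (aSolve ps i kk.1 (aSolve ps (kk.1 + 1) j amem).2).2) c2.2
            exact ⟨f1, f2⟩
      rw [aSolve, pureV, if_neg h, if_neg h]
      cases hget : PySem.Dict.get? memo (i, j) with
      | some v =>
        have hv := hm (i, j) v hget
        constructor
        · rw [hv, pureV, if_neg h]
        · exact hm
      | none =>
        obtain ⟨e1, e2⟩ := key ((List.range' i (j - i)).attach) ((none : Option Int), memo) hm
        simp only []
        constructor
        · rw [e1]
        · apply memoOK_insert ps _ i j e2
          rw [pureV, if_neg h]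
          simp only []
          rw [e1]

-- ----- B side -----

def Shaped (dp : List (List Int)) (N : Nat) : Prop :=
  dp.length = N ∧ ∀ r ∈ dp, r.length = N

theorem shaped_set2 (dp : List (List Int)) (N i j : Nat) (v : Int) (hi : i < N)
    (h : Shaped dp N) : Shaped (pvSet2 dp i j v) N := by
  obtain ⟨hlen, hrows⟩ := h
  have hid : i < dp.length := by omega
  have hrow : dp.getD i [] = dp[i] := by
    rw [List.getD_eq_getElem?_getD, List.getElem?_eq_getElem hid]; rfl
  constructor
  · simp [pvSet2, hlen]
  · intro r hr
    rcases List.mem_or_eq_of_mem_set hr with h' | h'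
    · exact hrows r h'
    · subst h'
      rw [List.length_set, hrow]
      exact hrows _ (List.getElem_mem hid)

theorem get2_set2 (dp : List (List Int)) (N : Nat) (h : Shaped dp N)
    (i j i' j' : Nat) (v : Int) (hi : i < N) (hj : j < N) :
    pvGet2 (pvSet2 dp i j v) i' j' =
      if i' = i ∧ j' = j then v else pvGet2 dp i' j' := by
  obtain ⟨hlen, hrows⟩ := h
  have hid : i < dp.length := by omega
  have hrow : dp.getD i [] = dp[i] := by
    rw [List.getD_eq_getElem?_getD, List.getElem?_eq_getElem hid]; rfl
  have hrl : (dp.getD i []).length = N := by rw [hrow]; exact hrows _ (List.getElem_mem hid)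
  unfold pvGet2 pvSet2
  by_cases hii : i' = i
  · rw [hii]
    have hsel : (dp.set i ((dp.getD i []).set j v)).getD i [] = (dp.getD i []).set j v := by
      rw [List.getD_eq_getElem?_getD, List.getElem?_set, if_pos rfl, if_pos hid]; rfl
    rw [hsel]
    by_cases hjj : j' = j
    · rw [hjj, if_pos ⟨rfl, rfl⟩, List.getD_eq_getElem?_getD, List.getElem?_set,
        if_pos rfl, if_pos (by omega)]
      rfl
    · rw [if_neg (by tauto), List.getD_eq_getElem?_getD, List.getElem?_set,
        if_neg (fun hh => hjj hh.symm), ← List.getD_eq_getElem?_getD]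
  · rw [if_neg (by tauto)]
    have hsel : (dp.set i ((dp.getD i []).set j v)).getD i' [] = dp.getD i' [] := by
      rw [List.getD_eq_getElem?_getD, List.getElem?_set, if_neg (fun hh => hii hh.symm),
        ← List.getD_eq_getElem?_getD]
    rw [hsel]

theorem foldl_attach_congr {a b : Type} (l : List a) (f : b → {x // x ∈ l} → b) (g : b → a → b)
    (h : ∀ (acc : b) (x : {x // x ∈ l}), f acc x = g acc x.1) (init : b) :
    l.attach.foldl f init = l.foldl g init := by
  have h2 : l.foldl g init = l.attach.foldl (fun acc x => g acc x.1) init := by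
    conv_lhs => rw [← List.attach_map_subtype_val l]
    rw [List.foldl_map]
  rw [h2]
  exact PySem.List.foldl_congr_mem _ _ _ _ (fun acc x _ => h acc x)

theorem cell_eq_pureV (ps : List Int) (dp : List (List Int)) (N i j : Nat)
    (hij : i < j) (hj : j < N)
    (hagree : ∀ i' j', i' ≤ j' → j' < N → j' - i' < j - i → pvGet2 dp i' j' = pureV ps i' j') :
    pvCell ps dp i j = pureV ps i j := by
  rw [pvCell, pureV, if_neg (by omega)]
  congr 1
  symm
  apply foldl_attach_congr
  intro acc kk
  have hk := kk.2
  rw [List.mem_range'_1] at hk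
  obtain ⟨hk1, hk2⟩ := hk
  have hk3 : kk.1 < j := by omega
  simp only []
  rw [hagree (kk.1 + 1) j (by omega) hj (by omega), hagree i kk.1 (by omega) (by omega) (by omega)]
  cases acc with
  | none => rfl
  | some r =>
    simp only []
    split_ifs with hv
    · congr 1
      omega
    · congr 1
      omega

def Partial (ps : List Int) (dp : List (List Int)) (N len s : Nat) : Prop :=
  Shaped dp N ∧
  ∀ i' j', i' ≤ j' → j' < N → (j' - i' + 1 < len ∨ (j' - i' + 1 = len ∧ i' < s)) →
    pvGet2 dp i' j' = pureV ps i' j'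

theorem inner_fold (ps : List Int) (N len : Nat) (h2 : 2 ≤ len) (hlen : len ≤ N) :
    ∀ (t s : Nat) (dp : List (List Int)), s + t ≤ N - len + 1 → Partial ps dp N len s →
      Partial ps
        ((List.range' s t).foldl
          (fun dp i => pvSet2 dp i (i + len - 1) (pvCell ps dp i (i + len - 1))) dp)
        N len (s + t) := by
  intro t
  induction t with
  | zero =>
    intro s dp hs hp
    simpa using hp
  | succ t iht =>
    intro s dp hs hp
    rw [List.range'_succ, List.foldl_cons]
    obtain ⟨hsh, hag⟩ := hp
    have hsN : s + len - 1 < N := by omega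
    have hsN' : s < N := by omega
    have hcell : pvCell ps dp s (s + len - 1) = pureV ps s (s + len - 1) := by
      apply cell_eq_pureV ps dp N s (s + len - 1) (by omega) hsN
      intro i' j' h1 h2 h3
      exact hag i' j' h1 h2 (Or.inl (by omega))
    have hp' : Partial ps (pvSet2 dp s (s + len - 1) (pvCell ps dp s (s + len - 1)))
        N len (s + 1) := by
      constructor
      · exact shaped_set2 dp N s (s + len - 1) _ hsN' hsh
      · intro i' j' h1 h2 h3
        rw [get2_set2 dp N hsh s (s + len - 1) i' j' _ hsN' hsN]
        by_cases heq : i' = s ∧ j' = s + len - 1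
        · rw [if_pos heq, heq.1, heq.2]
          exact hcell
        · rw [if_neg heq]
          apply hag i' j' h1 h2
          rcases h3 with h3 | ⟨h3a, h3b⟩
          · exact Or.inl h3
          · refine Or.inr ⟨h3a, ?_⟩
            by_cases his : i' = s
            · exact absurd ⟨his, by omega⟩ heq
            · omega
    have hres := iht (s + 1) _ (by omega) hp'
    rw [show s + (t + 1) = (s + 1) + t by omega]
    exact hres

def AllAgree (ps : List Int) (dp : List (List Int)) (N L : Nat) : Prop :=
  Shaped dp N ∧
  ∀ i' j', i' ≤ j' → j' < N → j' - i' + 1 ≤ L → pvGet2 dp i' j' = pureV ps i' j'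

theorem outer_fold (ps : List Int) (N : Nat) :
    ∀ (t L : Nat) (dp : List (List Int)), 1 ≤ L → L + t ≤ N → AllAgree ps dp N L →
      AllAgree ps
        ((List.range' (L + 1) t).foldl
          (fun dp len =>
            (List.range (N - len + 1)).foldl
              (fun dp i => pvSet2 dp i (i + len - 1) (pvCell ps dp i (i + len - 1))) dp)
          dp)
        N (L + t) := by
  intro t
  induction t with
  | zero =>
    intro L dp hL ht h3
    simpa using h3
  | succ t iht =>
    intro L dp hL ht h3
    rw [List.range'_succ, List.foldl_cons]
    have hpart : Partial ps dp N (L + 1) 0 := by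
      refine ⟨h3.1, ?_⟩
      intro i' j' a b c
      exact h3.2 i' j' a b (by omega)
    have hin := inner_fold ps N (L + 1) (by omega) (by omega) (N - (L + 1) + 1) 0 dp
      (by omega) hpart
    rw [List.range_eq_range']
    have hAll : AllAgree ps
        ((List.range' 0 (N - (L + 1) + 1)).foldl
          (fun dp i => pvSet2 dp i (i + (L + 1) - 1) (pvCell ps dp i (i + (L + 1) - 1))) dp)
        N (L + 1) := by
      refine ⟨hin.1, ?_⟩
      intro i' j' a b c
      apply hin.2 i' j' a b
      by_cases hc : j' - i' + 1 = L + 1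
      · exact Or.inr ⟨hc, by omega⟩
      · exact Or.inl (by omega)
    have hres := iht (L + 1) _ (by omega) (by omega) hAll
    rw [show L + (t + 1) = (L + 1) + t by omega]
    exact hres

theorem alt_eq_pureV (n : Int) (A : List Int) (h1 : 1 ≤ n) :
    solve_game_alt n A = pureV (pvPrefix n A) 0 (n.toNat - 1) := by
  have hN1 : 1 ≤ n.toNat := by omega
  simp only [solve_game_alt]
  have h0 : AllAgree (pvPrefix n A)
      (List.replicate n.toNat (List.replicate n.toNat (0 : Int))) n.toNat 1 := by
    constructor
    · constructor
      · simp
      · intro r hr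
        rw [List.eq_of_mem_replicate hr]
        simp
    · intro i' j' a b c
      have hij : i' = j' := by omega
      subst hij
      rw [pureV, if_pos rfl, pvGet2, List.getD_replicate _ (by omega),
        List.getD_replicate _ (by omega)]
  have hout := outer_fold (pvPrefix n A) n.toNat (n.toNat - 1) 1
    (List.replicate n.toNat (List.replicate n.toNat (0 : Int))) le_rfl (by omega) h0
  rw [show n.toNat + 1 - 2 = n.toNat - 1 by omega]
  have h2 : (1 : Nat) + 1 = 2 := rfl
  rw [h2] at hout
  exact hout.2 0 (n.toNat - 1) (by omega) (by omega) (by omega)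

-- ===== VERDICT (by name: the statement is the Claim_ definition above) =====
theorem solve_game_spec : Claim_equal_solve_game := by
  intro n A _hdom hpre
  unfold Spec_solve_game
  obtain ⟨h1, _h2⟩ := hpre
  have hA : (aSolve (pvPrefix n A) 0 (n - 1).toNat PySem.Dict.empty).1
      = pureV (pvPrefix n A) 0 (n - 1).toNat :=
    (aSolve_eq_pureV (pvPrefix n A) n.toNat 0 (n - 1).toNat PySem.Dict.empty
      (by omega) (by intro p v h; simp [PySem.Dict.get?_empty] at h)).1
  have ht : (n - 1).toNat = n.toNat - 1 := by omega
  rw [solve_game, hA, ht, alt_eq_pureV n A h1]
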